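-- pv_equiv track=rewrite | github.com/duongtuanneu-hub/python-foundation | homework3.py | segment_users
-- ===== SOURCE A (Python) =====
-- def segment_users(order_counts):
--     result = {"one_time": set(), "repeat": set(), "vip": set()}
--     for user_id, count in order_counts.items():
--         if count == 1:
--             result["one_time"].add(user_id)
--         elif count <= 4:
--             result["repeat"].add(user_id)
--         else:
--             result["vip"].add(user_id)
--     return result
-- ===== SOURCE B (Python) =====
-- def segment_users(order_counts):
--     items = order_counts.items()
--     return {
--         "one_time": {u for u, c in items if c == 1},
--         "repeat": {u for u, c in items if c != 1 and c <= 4},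
--         "vip": {u for u, c in items if c > 4},
--     }
-- ===== Notes on version B (the rewrite author's own statement) =====
-- stated objective: simpler
-- what changed: Replaces the single branching loop that mutates three sets with three independent filtered set comprehensions over the items, one per category.
import Mathlib
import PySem

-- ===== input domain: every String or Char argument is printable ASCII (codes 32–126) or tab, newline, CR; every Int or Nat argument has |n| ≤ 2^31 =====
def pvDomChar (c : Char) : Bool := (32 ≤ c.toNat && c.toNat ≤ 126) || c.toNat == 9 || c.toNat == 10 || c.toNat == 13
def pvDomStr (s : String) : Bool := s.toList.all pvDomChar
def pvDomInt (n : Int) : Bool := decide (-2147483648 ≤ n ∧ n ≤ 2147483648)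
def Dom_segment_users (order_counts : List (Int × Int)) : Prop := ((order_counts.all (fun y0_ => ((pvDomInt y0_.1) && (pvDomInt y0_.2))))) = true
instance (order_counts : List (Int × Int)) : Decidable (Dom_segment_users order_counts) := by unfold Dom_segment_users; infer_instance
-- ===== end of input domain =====

-- B replaces A's single branching loop over the dict with three independent filtered
-- set comprehensions, one per category (objective: simpler).

-- ===== PORT A =====
-- A: one pass over order_counts.items(), adding each user_id to one of three sets.
def segment_users (order_counts : List (Int × Int)) : List (String × List Int) :=
  let st := order_counts.foldl
    (fun (r : PySem.Set Int × PySem.Set Int × PySem.Set Int) p =>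
      if p.2 == 1 then (PySem.Set.add r.1 p.1, r.2.1, r.2.2)
      else if p.2 ≤ 4 then (r.1, PySem.Set.add r.2.1 p.1, r.2.2)
      else (r.1, r.2.1, PySem.Set.add r.2.2 p.1))
    (PySem.Set.empty, PySem.Set.empty, PySem.Set.empty)
  [("one_time", st.1), ("repeat", st.2.1), ("vip", st.2.2)]

-- ===== PORT B =====
-- B: three filtered set comprehensions over the same items.
def segment_users_alt (order_counts : List (Int × Int)) : List (String × List Int) :=
  [("one_time", PySem.Set.ofList ((order_counts.filter (fun p => p.2 == 1)).map Prod.fst)),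
   ("repeat",   PySem.Set.ofList ((order_counts.filter (fun p => p.2 != 1 && decide (p.2 ≤ 4))).map Prod.fst)),
   ("vip",      PySem.Set.ofList ((order_counts.filter (fun p => decide (4 < p.2))).map Prod.fst))]

-- ===== PRECONDITION & SPEC =====
def Spec_segment_users (order_counts : List (Int × Int)) (out : List (String × List Int)) : Prop := out = segment_users_alt order_counts
instance (order_counts : List (Int × Int)) (out : List (String × List Int)) : Decidable (Spec_segment_users order_counts out) := by unfold Spec_segment_users; infer_instance

-- ===== CLAIM (what is proved, stated in full; the proofs are below) =====
def Claim_equal_segment_users : Prop := ∀ (order_counts : List (Int × Int)), Dom_segment_users order_counts → Spec_segment_users order_counts (segment_users order_counts)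

-- ===== LEMMAS AND PROOFS =====

-- Loop invariant of A's single pass: from any state (s1, s2, s3) it performs, on each
-- component, Set.update with the keys of the corresponding filtered sublist.
lemma seg_loop (oc : List (Int × Int)) (s1 s2 s3 : PySem.Set Int) :
    oc.foldl
      (fun (r : PySem.Set Int × PySem.Set Int × PySem.Set Int) p =>
        if p.2 == 1 then (PySem.Set.add r.1 p.1, r.2.1, r.2.2)
        else if p.2 ≤ 4 then (r.1, PySem.Set.add r.2.1 p.1, r.2.2)
        else (r.1, r.2.1, PySem.Set.add r.2.2 p.1)) (s1, s2, s3)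
    = (PySem.Set.update s1 ((oc.filter (fun p => p.2 == 1)).map Prod.fst),
       PySem.Set.update s2 ((oc.filter (fun p => p.2 != 1 && decide (p.2 ≤ 4))).map Prod.fst),
       PySem.Set.update s3 ((oc.filter (fun p => decide (4 < p.2))).map Prod.fst)) := by
  induction oc generalizing s1 s2 s3 with
  | nil => simp [PySem.Set.update]
  | cons h t ih =>
    obtain ⟨u, c⟩ := h
    rw [List.foldl_cons]
    by_cases h1 : c = 1
    · rw [show (if ((u, c).2 == 1 : Bool) then (PySem.Set.add s1 (u, c).1, s2, s3)
            else if (u, c).2 ≤ 4 then (s1, PySem.Set.add s2 (u, c).1, s3)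
            else (s1, s2, PySem.Set.add s3 (u, c).1))
          = (PySem.Set.add s1 u, s2, s3) from by simp [h1], ih]
      simp [h1, PySem.Set.update]
    · by_cases h2 : c ≤ 4
      · rw [show (if ((u, c).2 == 1 : Bool) then (PySem.Set.add s1 (u, c).1, s2, s3)
              else if (u, c).2 ≤ 4 then (s1, PySem.Set.add s2 (u, c).1, s3)
              else (s1, s2, PySem.Set.add s3 (u, c).1))
            = (s1, PySem.Set.add s2 u, s3) from by simp [h1, h2], ih]
        simp [h1, h2, PySem.Set.update, show ¬ (4 < c) from by omega]
      · rw [show (if ((u, c).2 == 1 : Bool) then (PySem.Set.add s1 (u, c).1, s2, s3)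
              else if (u, c).2 ≤ 4 then (s1, PySem.Set.add s2 (u, c).1, s3)
              else (s1, s2, PySem.Set.add s3 (u, c).1))
            = (s1, s2, PySem.Set.add s3 u) from by simp [h1, h2], ih]
        simp [h1, h2, PySem.Set.update, show 4 < c from by omega]

-- ===== VERDICT (by name: the statement is the Claim_ definition above) =====
theorem segment_users_spec : Claim_equal_segment_users := by
  intro oc _
  show segment_users oc = segment_users_alt oc
  unfold segment_users segment_users_alt
  rw [seg_loop]
  simp [PySem.Set.ofList_eq_foldl, PySem.Set.update, PySem.Set.empty]
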